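-- pv_equiv track=rewrite | github.com/gillerick/Data-Structures-Algorithms | Interview Preparation Kit/numPlayers.py | numPlayers
-- ===== SOURCE A (Python) =====
-- def numPlayers(k, scores):
--     scores_count = {}
--     players_count = 0
--     for score in sorted(scores, reverse=True):
--         scores_count[score] = scores.count(score)
--     for count in scores_count.values():
--         while players_count < k:
--             players_count += count
--     return players_count
-- ===== SOURCE B (Python) =====
-- def numPlayers(k, scores):
--     best = None
--     c = 0
--     for s in scores:
--         if best is None or s > best:
--             best, c = s, 1
--         elif s == best:
--             c += 1
--     if c == 0 or k <= 0:
--         return 0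
--     return -(-k // c) * c
-- ===== Notes on version B (the rewrite author's own statement) =====
-- stated objective: faster
-- what changed: B replaces A's sorted()+per-distinct-score scores.count() dict and repeated while-loops by a single pass that tracks the maximum and its frequency, then computes the answer as ceiling-division -(-k//c)*c.
import Mathlib
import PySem

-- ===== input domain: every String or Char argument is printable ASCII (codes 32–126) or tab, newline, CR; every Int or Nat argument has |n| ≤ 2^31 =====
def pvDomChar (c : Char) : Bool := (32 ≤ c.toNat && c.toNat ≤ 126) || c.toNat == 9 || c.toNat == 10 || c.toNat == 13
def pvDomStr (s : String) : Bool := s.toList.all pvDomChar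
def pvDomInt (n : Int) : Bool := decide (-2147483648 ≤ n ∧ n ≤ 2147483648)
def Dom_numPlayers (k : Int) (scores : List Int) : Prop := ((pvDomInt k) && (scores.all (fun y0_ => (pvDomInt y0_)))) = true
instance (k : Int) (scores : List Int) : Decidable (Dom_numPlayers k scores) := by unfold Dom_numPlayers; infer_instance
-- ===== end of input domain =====

-- B replaces A's quadratic count-per-distinct-score dict and while-loops by a single
-- max/frequency pass and a ceiling-division formula (measured faster, asymptotic).

-- ===== PORT A =====
-- the inner 'while players_count < k: players_count += count'; in A every count is the
-- list-count of a present element, hence positive, so the 'count ≤ 0' guard (where the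
-- Python loop would not terminate) only makes the recursion total and is never reached
def pvWhileAdd (k count players_count : Int) : Int :=
  if players_count < k then
    if 0 < count then pvWhileAdd k count (players_count + count) else players_count
  else players_count
termination_by (k - players_count).toNat
decreasing_by omega

def numPlayers (k : Int) (scores : List Int) : Int :=
  let scores_count : PySem.Dict Int Int :=
    (PySem.List.sorted scores (fun x => x) true).foldl
      (fun d score => d.insert score (PySem.List.count scores score)) PySem.Dict.empty
  scores_count.values.foldl (fun players_count count => pvWhileAdd k count players_count) 0

-- ===== PORT B =====
def numPlayers_alt (k : Int) (scores : List Int) : Int :=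
  let p : Option Int × Int := scores.foldl
    (fun (p : Option Int × Int) s =>
      match p.1 with
      | none => (some s, 1)
      | some b => if b < s then (some s, 1) else if s = b then (p.1, p.2 + 1) else p)
    (none, 0)
  if p.2 = 0 ∨ k ≤ 0 then 0
  else (-(PySem.Int.floordiv (-k) p.2)) * p.2

-- ===== PRECONDITION & SPEC =====
def Spec_numPlayers (k : Int) (scores : List Int) (out : Int) : Prop := out = numPlayers_alt k scores
instance (k : Int) (scores : List Int) (out : Int) : Decidable (Spec_numPlayers k scores out) := by unfold Spec_numPlayers; infer_instance

-- ===== CLAIM (what is proved, stated in full; the proofs are below) =====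
def Claim_equal_numPlayers : Prop := ∀ (k : Int) (scores : List Int), Dom_numPlayers k scores → Spec_numPlayers k scores (numPlayers k scores)

-- ===== LEMMAS AND PROOFS =====

-- once players_count ≥ k, pvWhileAdd is the identity, whatever count is
lemma pvWhileAdd_of_ge (k count pc : Int) (h : ¬ pc < k) : pvWhileAdd k count pc = pc := by
  rw [pvWhileAdd]; simp [h]

-- hence the fold over the remaining dict values is the identity from a state ≥ k
lemma foldl_pvWhileAdd_of_ge (k : Int) (vs : List Int) :
    ∀ pc : Int, ¬ pc < k → vs.foldl (fun pc c => pvWhileAdd k c pc) pc = pc := by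
  induction vs with
  | nil => intro pc _; rfl
  | cons v vt ih =>
    intro pc h
    simp only [List.foldl_cons, pvWhileAdd_of_ge k v pc h]
    exact ih pc h

-- the while-loop lands exactly on N, the unique value in [k, k + c) congruent to pc mod c
lemma pvWhileAdd_eq_target (k c N : Int) (hc : 0 < c) (hkN : k ≤ N) (hNk : N - c < k) :
    ∀ (n : Nat) (pc : Int), (N - pc).toNat ≤ n → c ∣ (N - pc) → pc ≤ N → pvWhileAdd k c pc = N := by
  intro n
  induction n with
  | zero =>
    intro pc hn _ hle
    have hpc : pc = N := by omega
    subst hpc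
    rw [pvWhileAdd]
    simp only [show ¬ pc < k from by omega, if_false]
  | succ n ih =>
    intro pc hn hdvd hle
    rw [pvWhileAdd]
    by_cases h : pc < k
    · simp only [h, if_true, hc, if_true]
      rcases hdvd with ⟨t, ht⟩
      have hpos : 0 < c * t := by omega
      have ht1 : 1 ≤ t := by
        by_contra hcon
        rw [not_le] at hcon
        have h0 : t ≤ 0 := by omega
        nlinarith [mul_nonpos_of_nonneg_of_nonpos hc.le h0]
      have hge : c ≤ c * t := by nlinarith
      exact ih (pc + c) (by omega) ⟨t - 1, by linarith [mul_sub c t 1]⟩ (by omega)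
    · simp only [h, if_false]
      rcases hdvd with ⟨t, ht⟩
      have h0 : 0 ≤ c * t := by omega
      have hlt : c * t < c := by omega
      have hta : 0 ≤ t := by
        by_contra hcon
        rw [not_le] at hcon
        nlinarith [mul_nonpos_of_nonneg_of_nonpos hc.le (show t ≤ 0 by omega)]
      have htb : t ≤ 0 := by
        by_contra hcon
        rw [not_le] at hcon
        nlinarith
      have ht0 : t = 0 := by omega
      rw [ht0, mul_zero] at ht
      omega

lemma foldl_max_self_le (xs : List Int) : ∀ b : Int, b ≤ xs.foldl max b := by
  induction xs with
  | nil => intro b; simp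
  | cons y ys ih => intro b; exact le_trans (le_max_left b y) (ih (max b y))

lemma le_foldl_max_of_mem (xs : List Int) : ∀ b x : Int, x ∈ xs → x ≤ xs.foldl max b := by
  induction xs with
  | nil => intro b x hx; simp at hx
  | cons y ys ih =>
    intro b x hx
    rcases List.mem_cons.mp hx with h | h
    · subst h; exact le_trans (le_max_right b x) (foldl_max_self_le ys (max b x))
    · exact ih (max b y) x h

lemma foldl_max_mem (xs : List Int) : ∀ b : Int, xs.foldl max b = b ∨ xs.foldl max b ∈ xs := by
  induction xs with
  | nil => intro b; simp
  | cons y ys ih =>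
    intro b
    simp only [List.foldl_cons]
    rcases ih (max b y) with h | h
    · rcases le_or_gt y b with hyb | hyb
      · left; rw [h]; omega
      · right; rw [h]; simp; left; omega
    · right; exact List.mem_cons_of_mem y h

-- B's fold from a running (some b, c): the final maximum is foldl max b, the final count
-- is c continued iff the maximum stayed b, plus its occurrences in the rest
lemma bfold_some (xs : List Int) :
    ∀ (b c : Int), xs.foldl
      (fun (p : Option Int × Int) s =>
        match p.1 with
        | none => (some s, 1)
        | some b => if b < s then (some s, 1) else if s = b then (p.1, p.2 + 1) else p)
      (some b, c)
    = (some (xs.foldl max b),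
       (if xs.foldl max b = b then c else 0) + (xs.count (xs.foldl max b) : Int)) := by
  induction xs with
  | nil => intro b c; simp
  | cons x xs ih =>
    intro b c
    simp only [List.foldl_cons]
    by_cases h1 : b < x
    · simp only [if_pos h1]
      rw [ih x 1]
      have hmax : max b x = x := by omega
      have hM : xs.foldl max x ≠ b := by have := foldl_max_self_le xs x; omega
      simp only [hmax, hM, if_false, List.count_cons]
      by_cases h2 : xs.foldl max x = x <;> simp [h2] <;> omega
    · by_cases h2 : x = b
      · subst h2
        rw [if_neg (lt_irrefl x), if_pos rfl]
        rw [ih x (c + 1)]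
        simp only [max_self, List.count_cons]
        by_cases h3 : xs.foldl max x = x <;> simp [h3] <;> omega
      · simp only [if_neg h1, if_neg h2]
        rw [ih b c]
        have hmax : max b x = b := by omega
        have hM : xs.foldl max b ≠ x := by
          have := foldl_max_self_le xs b; omega
        have hM' : ¬ x = xs.foldl max b := fun hx => hM hx.symm
        simp only [hmax, List.count_cons]
        simp [hM']

-- a fold of inserts whose value depends only on the key keeps the first item in place
lemma items_head_foldl (l : List Int) (f : Int → Int) (p : Int) :
    ∀ d : PySem.Dict Int Int, d.items.head? = some (p, f p) →
    (l.foldl (fun d x => d.insert x (f x)) d).items.head? = some (p, f p) := by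
  induction l with
  | nil => intro d hd; exact hd
  | cons x xs ih =>
    intro d hd
    simp only [List.foldl_cons]
    apply ih
    rw [PySem.Dict.items_insert]
    rcases hh : d.items with _ | ⟨q, rest⟩
    · rw [hh] at hd; simp at hd
    · rw [hh] at hd; simp at hd
      by_cases hcon : d.contains x
      · simp only [hcon, if_true, hh, List.map_cons, List.head?_cons]
        subst hd
        by_cases hpx : p = x
        · subst hpx; simp
        · simp [hpx]
      · simp only [hcon, if_false, hh, List.cons_append, List.head?_cons, hd]
        simp [← hd]

-- ===== VERDICT proof =====
theorem numPlayers_spec : Claim_equal_numPlayers := by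
  unfold Claim_equal_numPlayers
  intro k scores _
  unfold Spec_numPlayers numPlayers numPlayers_alt
  cases scores with
  | nil => rfl
  | cons s rest =>
    set scores := s :: rest with hsc
    -- the sorted-descending list and its head, the maximum
    have hLne : PySem.List.sorted scores (fun x => x) true ≠ [] := by
      rw [Ne, PySem.List.sorted_eq_nil_iff]; simp [hsc]
    rcases hL : PySem.List.sorted scores (fun x => x) true with _ | ⟨m, t⟩
    · exact absurd hL hLne
    have hub : ∀ y ∈ scores, y ≤ m := by
      have h := PySem.List.key_head_sorted_rev_ge (xs := scores) (key := fun x => x) hL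
      simpa using h
    have hm_mem : m ∈ scores := by
      rw [← PySem.List.mem_sorted (key := fun x => x) (rev := true), hL]
      exact List.mem_cons_self
    -- B's maximum equals m
    have hMub : ∀ y ∈ scores, y ≤ rest.foldl max s := by
      intro y hy
      rcases List.mem_cons.mp hy with h | h
      · subst h; exact foldl_max_self_le rest y
      · exact le_foldl_max_of_mem rest s y h
    have hMmem : rest.foldl max s ∈ scores := by
      rcases foldl_max_mem rest s with h | h
      · rw [h]; exact List.mem_cons_self
      · exact List.mem_cons_of_mem s h
    have hMm : rest.foldl max s = m := le_antisymm (hub _ hMmem) (hMub _ hm_mem)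
    -- B's accumulated pair is the maximum together with its multiplicity
    have hBfold : (scores.foldl
        (fun (p : Option Int × Int) s =>
          match p.1 with
          | none => (some s, 1)
          | some b => if b < s then (some s, 1) else if s = b then (p.1, p.2 + 1) else p)
        ((none : Option Int), (0 : Int))) = (some m, (((s :: rest).count m : Nat) : Int)) := by
      rw [hsc]
      simp only [List.foldl_cons]
      rw [bfold_some rest s 1, hMm]
      simp only [List.count_cons]
      by_cases h : m = s <;> simp [h] <;> omega
    rw [hBfold]
    -- A's dict: its first value is the count of m
    have hd1 : ((PySem.Dict.empty : PySem.Dict Int Int).insert m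
          ((PySem.List.count scores m : Nat) : Int)).items.head?
        = some (m, ((PySem.List.count scores m : Nat) : Int)) := by
      simp [PySem.Dict.items_insert_of_not_contains, PySem.Dict.contains_empty]
      rfl
    have hhead := items_head_foldl t (fun x => ((PySem.List.count scores x : Nat) : Int)) m _ hd1
    simp only [] at hhead
    simp only [List.foldl_cons]
    set d := t.foldl (fun d x => d.insert x ((PySem.List.count scores x : Nat) : Int))
      ((PySem.Dict.empty : PySem.Dict Int Int).insert m ((PySem.List.count scores m : Nat) : Int)) with hd
    have hvals : d.values.head? = some ((PySem.List.count scores m : Nat) : Int) := by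
      simp only [PySem.Dict.values]
      rcases hi : d.items with _ | ⟨p0, rest'⟩
      · rw [hi] at hhead; simp at hhead
      · rw [hi] at hhead; simp at hhead; simp [hhead]
    rcases hv : d.values with _ | ⟨v0, vt⟩
    · rw [hv] at hvals; simp at hvals
    rw [hv] at hvals
    simp only [List.head?_cons, Option.some.injEq] at hvals
    subst hvals
    -- the PySem count is the plain count of m in s :: rest
    have hcm : ((PySem.List.count scores m : Nat) : Int) = (((s :: rest).count m : Nat) : Int) := by
      simp [PySem.List.count_eq, hsc]
    set c := (((s :: rest).count m : Nat) : Int) with hcdef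
    have hcpos : (0 : Int) < c := by
      have h0 : 0 < (s :: rest).count m := List.count_pos_iff.mpr (by rw [← hsc]; exact hm_mem)
      rw [hcdef]
      exact_mod_cast h0
    simp only [List.foldl_cons]
    rw [hcm]
    by_cases hk : k ≤ 0
    · rw [pvWhileAdd_of_ge k c 0 (by omega), foldl_pvWhileAdd_of_ge k vt 0 (by omega)]
      simp [hk]
    · -- k > 0 : the loop reaches the least multiple of c that is ≥ k
      set q := -(PySem.Int.floordiv (-k) c) with hq
      have hbr : (q - 1) * c < k ∧ k ≤ q * c :=
        (PySem.Int.neg_floordiv_neg_eq_iff_of_pos hcpos).mp hq.symm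
      have hA : pvWhileAdd k c 0 = q * c := by
        apply pvWhileAdd_eq_target k c (q * c) hcpos hbr.2 (by nlinarith [hbr.1]) (q * c - 0).toNat 0 le_rfl
        · exact ⟨q, by ring⟩
        · omega
      rw [hA, foldl_pvWhileAdd_of_ge k vt (q * c) (by omega)]
      have hcond : ¬ (c = 0 ∨ k ≤ 0) := by omega
      simp [hcond]
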